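-- pv_equiv track=rewrite | github.com/williamvietnguyen/clawde | bot.py | format_move_list
-- ===== SOURCE A (Python) =====
-- def format_move_list(moves: list[str]) -> str:
--     lines = []
--     for i in range(0, len(moves), 2):
--         num = i // 2 + 1
--         white = moves[i]
--         black = moves[i + 1] if i + 1 < len(moves) else ""
--         lines.append(f"{num}. {white} {black}".rstrip())
--     return "\n".join(lines) if lines else "(no moves yet)"
-- ===== SOURCE B (Python) =====
-- def format_move_list(moves: list[str]) -> str:
--     lines = []
--     pending = None  # white move awaiting its black reply
--     num = 1
--     for mv in moves:
--         if pending is None: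
--             pending = mv
--         else:
--             lines.append(f"{num}. {pending} {mv}".rstrip())
--             pending = None
--             num += 1
--     if pending is not None:
--         lines.append(f"{num}. {pending}".rstrip())
--     return "\n".join(lines) if lines else "(no moves yet)"
-- ===== Notes on version B (the rewrite author's own statement) =====
-- stated objective: alternative
-- what changed: Replaces the stride-2 index loop with its i//2+1 numbering and i+1 bounds check by a single pass over the elements themselves: a pending-white/black pairing state machine with an explicit move-number counter.
import Mathlib
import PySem

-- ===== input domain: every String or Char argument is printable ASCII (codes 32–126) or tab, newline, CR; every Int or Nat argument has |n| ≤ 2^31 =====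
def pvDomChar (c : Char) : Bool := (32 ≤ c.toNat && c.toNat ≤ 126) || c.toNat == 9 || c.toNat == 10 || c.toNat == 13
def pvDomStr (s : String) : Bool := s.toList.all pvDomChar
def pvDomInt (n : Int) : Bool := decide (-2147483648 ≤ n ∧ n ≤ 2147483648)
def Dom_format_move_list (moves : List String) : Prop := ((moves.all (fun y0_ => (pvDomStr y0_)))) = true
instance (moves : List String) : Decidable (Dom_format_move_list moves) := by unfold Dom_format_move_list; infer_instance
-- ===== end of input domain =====

-- B replaces A's stride-2 index loop (with i//2 numbering and an i+1 bounds check) by a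
-- single pass over the moves themselves: a pending-white pairing state with a move counter.

-- ===== PORT A =====
def format_move_list (moves : List String) : String :=
  let lines : List String :=
    (PySem.List.pyRange 0 (moves.length : Int) 2).foldl (fun acc i =>
      let num := PySem.Int.floordiv i 2 + 1
      let white := PySem.List.pyGetD moves i ""          -- moves[i]: i is always in range inside the loop
      let black := if i + 1 < (moves.length : Int) then PySem.List.pyGetD moves (i + 1) "" else ""
      acc ++ [PySem.Str.rstrip (PySem.Str.join "" [PySem.Int.toStr num, ". ", white, " ", black])]) []
  if lines = [] then "(no moves yet)" else PySem.Str.join "\n" lines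

-- ===== PORT B =====
-- state: (lines so far, pending white move, current move number); the for-loop body
def fmlStep (st : List String × Option String × Int) (mv : String) :
    List String × Option String × Int :=
  match st with
  | (lines, none, num) => (lines, some mv, num)
  | (lines, some p, num) =>
      (lines ++ [PySem.Str.rstrip (PySem.Str.join "" [PySem.Int.toStr num, ". ", p, " ", mv])],
       none, num + 1)

-- the trailing 'if pending is not None' flush
def fmlFlush (st : List String × Option String × Int) : List String :=
  match st with
  | (lines, none, _) => lines
  | (lines, some p, num) =>
      lines ++ [PySem.Str.rstrip (PySem.Str.join "" [PySem.Int.toStr num, ". ", p])]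

def format_move_list_alt (moves : List String) : String :=
  let lines := fmlFlush (moves.foldl fmlStep ([], none, 1))
  if lines = [] then "(no moves yet)" else PySem.Str.join "\n" lines

-- ===== PRECONDITION & SPEC =====
def Spec_format_move_list (moves : List String) (out : String) : Prop := out = format_move_list_alt moves
instance (moves : List String) (out : String) : Decidable (Spec_format_move_list moves out) := by unfold Spec_format_move_list; infer_instance

-- ===== CLAIM (what is proved, stated in full; the proofs are below) =====
def Claim_equal_format_move_list : Prop := ∀ (moves : List String), Dom_format_move_list moves → Spec_format_move_list moves (format_move_list moves)

-- ===== LEMMAS AND PROOFS =====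

-- proof-side: B's pairing pass written as two-at-a-time recursion
def fmlGo (num : Int) : List String → List String
  | [] => []
  | [w] => [PySem.Str.rstrip (PySem.Str.join "" [PySem.Int.toStr num, ". ", w])]
  | w :: b :: rest =>
      [PySem.Str.rstrip (PySem.Str.join "" [PySem.Int.toStr num, ". ", w, " ", b])] ++ fmlGo (num + 1) rest

theorem rstrip_append_space (cs : List Char) :
    PySem.Chars.rstrip (cs ++ [' ']) = PySem.Chars.rstrip cs := by
  simp [PySem.Chars.rstrip, show PySem.Chars.isspace ' ' = true from by decide]

-- a trailing " " ++ "" in the f-string is erased by rstrip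
theorem join_drop_trailing (p w : String) :
    PySem.Str.rstrip (PySem.Str.join "" [p, ". ", w, " ", ""]) =
    PySem.Str.rstrip (PySem.Str.join "" [p, ". ", w]) := by
  apply String.ext
  simp only [PySem.Str.toList_rstrip, PySem.Str.toList_join, List.map_cons, List.map_nil]
  rw [show PySem.Chars.join "".toList [p.toList, ". ".toList, w.toList, " ".toList, "".toList]
        = PySem.Chars.join "".toList [p.toList, ". ".toList, w.toList] ++ [' '] by
      simp [PySem.Chars.join, List.intercalate, List.intersperse]]
  exact rstrip_append_space _

-- A's line at absolute index 2*k, with the numbering shifted by n (proof-side helper)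
def lineA (n : Nat) (moves : List String) (k : Nat) : String :=
  PySem.Str.rstrip (PySem.Str.join ""
    [PySem.Int.toStr ((n : Int) + k + 1), ". ", moves.getD (2 * k) "", " ",
     if 2 * (k : Int) + 1 < (moves.length : Int) then moves.getD (2 * k + 1) "" else ""])

theorem lineA_succ (w b : String) (rest : List String) (n k : Nat) :
    lineA n (w :: b :: rest) (k + 1) = lineA (n + 1) rest k := by
  have harith : ((n : Int) + (k + 1 : Nat) + 1) = (((n+1 : Nat)) : Int) + k + 1 := by
    push_cast; ring
  have hcond : (2 * ((k + 1 : Nat) : Int) + 1 < ((w :: b :: rest).length : Int))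
      ↔ (2 * ((k : Nat) : Int) + 1 < ((rest.length : Nat) : Int)) := by
    simp only [List.length_cons]; push_cast; omega
  simp only [lineA, harith]
  have hg1 : (w :: b :: rest).getD (2 * (k + 1)) "" = rest.getD (2 * k) "" := by
    have h : 2 * (k + 1) = 2 * k + 1 + 1 := by omega
    simp [h, List.getD]
  have hg2 : (w :: b :: rest).getD (2 * (k + 1) + 1) "" = rest.getD (2 * k + 1) "" := by
    have h : 2 * (k + 1) + 1 = 2 * k + 1 + 1 + 1 := by omega
    simp [h, List.getD]
  rw [hg1]
  by_cases h : (2 * ((k : Nat) : Int) + 1 < ((rest.length : Nat) : Int))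
  · rw [if_pos (hcond.mpr h), if_pos h, hg2]
  · rw [if_neg (fun hc => h (hcond.mp hc)), if_neg h]

theorem lineA_head (w b : String) (rest : List String) (n : Nat) :
    lineA n (w :: b :: rest) 0 =
      PySem.Str.rstrip (PySem.Str.join "" [PySem.Int.toStr ((n:Int) + 1), ". ", w, " ", b]) := by
  have hlt : (2 * ((0:Nat) : Int) + 1 < ((w :: b :: rest).length : Int)) := by
    simp only [List.length_cons]; push_cast; omega
  rw [lineA, if_pos hlt]
  norm_num [List.getD]

theorem map_lineA_eq_fmlGo (moves : List String) (n : Nat) :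
    (List.range ((moves.length + 1) / 2)).map (lineA n moves) = fmlGo ((n : Int) + 1) moves := by
  induction (0 : Int), moves using fmlGo.induct generalizing n with
  | case1 _ => simp [fmlGo]
  | case2 _ w =>
      have h1 : (([w] : List String).length + 1) / 2 = 1 := by simp
      rw [h1, List.range_one, List.map_singleton]
      simp only [lineA, Nat.cast_zero, add_zero, Nat.mul_zero, List.getD_cons_zero]
      rw [show (if 2 * (0:Int) + 1 < (([w] : List String).length : Int)
            then ([w] : List String).getD (0 + 1) "" else "") = "" by norm_num]
      show _ = [PySem.Str.rstrip (PySem.Str.join "" [PySem.Int.toStr ((n:Int) + 1), ". ", w])]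
      rw [join_drop_trailing]
  | case3 _ w b rest ih =>
      have hlen : ((w :: b :: rest).length + 1) / 2 = (rest.length + 1) / 2 + 1 := by
        simp only [List.length_cons]; omega
      rw [hlen, List.range_succ_eq_map, List.map_cons, List.map_map]
      have htail : (List.range ((rest.length + 1) / 2)).map (lineA n (w :: b :: rest) ∘ Nat.succ)
          = (List.range ((rest.length + 1) / 2)).map (lineA (n + 1) rest) :=
        List.map_congr_left (fun k _ => lineA_succ w b rest n k)
      rw [lineA_head w b rest n, htail, ih (n + 1)]
      have hnum : (((n + 1 : Nat)) : Int) + 1 = (n : Int) + 1 + 1 := by push_cast; ring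
      rw [hnum]
      rfl

-- A's whole loop produces exactly B's recursion
theorem linesA_eq_fmlGo (moves : List String) :
    (PySem.List.pyRange 0 (moves.length : Int) 2).foldl (fun acc i =>
      let num := PySem.Int.floordiv i 2 + 1
      let white := PySem.List.pyGetD moves i ""
      let black := if i + 1 < (moves.length : Int) then PySem.List.pyGetD moves (i + 1) "" else ""
      acc ++ [PySem.Str.rstrip (PySem.Str.join "" [PySem.Int.toStr num, ". ", white, " ", black])]) []
    = fmlGo 1 moves := by
  rw [PySem.List.foldl_append_singleton_eq_map, List.nil_append,
      PySem.List.pyRange_of_pos 0 (moves.length : Int) (by norm_num), List.map_map]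
  have hq : (if (0:Int) < (moves.length : Int)
      then (((moves.length : Int) - 0 + 2 - 1) / 2).toNat else 0) = (moves.length + 1) / 2 := by
    split_ifs with h <;> omega
  rw [hq]
  have hfun : ∀ k ∈ List.range ((moves.length + 1) / 2),
      PySem.Str.rstrip (PySem.Str.join ""
        [PySem.Int.toStr (PySem.Int.floordiv ((0:Int) + 2 * (k:Int)) 2 + 1), ". ",
         PySem.List.pyGetD moves ((0:Int) + 2 * (k:Int)) "", " ",
         if (0:Int) + 2 * (k:Int) + 1 < (moves.length : Int)
         then PySem.List.pyGetD moves ((0:Int) + 2 * (k:Int) + 1) "" else ""])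
      = lineA 0 moves k := by
    intro k _
    have h2k : (0 : Int) + 2 * (k : Int) = ((2 * k : Nat) : Int) := by push_cast; ring
    rw [h2k, PySem.List.pyGetD_natCast]
    have hdiv : PySem.Int.floordiv ((2 * k : Nat) : Int) 2 + 1 = ((0:Nat) : Int) + k + 1 := by
      rw [show ((2 : Int)) = ((2 : Nat) : Int) by norm_num, PySem.Int.floordiv_natCast]
      push_cast; omega
    rw [hdiv]
    have hcond : (((2 * k : Nat) : Int) + 1 < (moves.length : Int))
        ↔ (2 * (k : Int) + 1 < (moves.length : Int)) := by push_cast; omega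
    unfold lineA
    by_cases h : 2 * (k : Int) + 1 < (moves.length : Int)
    · rw [if_pos (hcond.mpr h), if_pos h,
        show ((2 * k : Nat) : Int) + 1 = ((2 * k + 1 : Nat) : Int) by push_cast; ring,
        PySem.List.pyGetD_natCast]
    · rw [if_neg (fun hc => h (hcond.mp hc)), if_neg h]
  simp only [Function.comp_def]
  rw [List.map_congr_left hfun, map_lineA_eq_fmlGo moves 0]
  norm_num

-- B's fold-then-flush equals the two-at-a-time recursion
theorem flush_foldl_eq_fmlGo (num : Int) (moves : List String) : ∀ lines,
    fmlFlush (moves.foldl fmlStep (lines, none, num)) = lines ++ fmlGo num moves := by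
  induction num, moves using fmlGo.induct with
  | case1 _ => intro lines; simp [fmlFlush, fmlGo]
  | case2 num w => intro lines; simp [List.foldl, fmlStep, fmlFlush, fmlGo]
  | case3 num w b rest ih =>
      intro lines
      simp only [List.foldl, fmlStep]
      rw [ih]
      simp [fmlGo]

-- ===== VERDICT (by name: the statement is the Claim_ definition above) =====
theorem format_move_list_spec : Claim_equal_format_move_list := by
  intro moves _
  unfold Spec_format_move_list format_move_list format_move_list_alt
  simp only [linesA_eq_fmlGo moves, flush_foldl_eq_fmlGo 1 moves [], List.nil_append]
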